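-- pv_equiv track=rewrite | github.com/T-rav/hyrdaflow | src/shape_phase.py | _find_human_reply
-- ===== SOURCE A (Python) =====
-- _SHAPE_OPTIONS_MARKER = "## Product Directions"
--
-- _SHAPE_TURN_MARKER = "**Shape Turn"
--
-- def _find_human_reply(comments: list[str]) -> str | None:
--     """Find the most recent human comment after the last agent turn."""
--     last_agent_idx = -1
--     for i, comment in enumerate(comments):
--         if _SHAPE_TURN_MARKER in comment or _SHAPE_OPTIONS_MARKER in comment:
--             last_agent_idx = i
--
--     if last_agent_idx == -1:
--         return None
--
--     # Look for human comments after the last agent comment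
--     for comment in comments[last_agent_idx + 1 :]:
--         if (
--             _SHAPE_TURN_MARKER not in comment
--             and _SHAPE_OPTIONS_MARKER not in comment
--         ):
--             return comment.strip()
--
--     return None
-- ===== SOURCE B (Python) =====
-- _SHAPE_OPTIONS_MARKER = "## Product Directions"
--
-- _SHAPE_TURN_MARKER = "**Shape Turn"
--
--
-- def _find_human_reply(comments: list[str]) -> str | None:
--     """Single reverse pass: the reply is the comment right after the last marker."""
--     candidate = None
--     for comment in reversed(comments):
--         if _SHAPE_TURN_MARKER in comment or _SHAPE_OPTIONS_MARKER in comment: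
--             return candidate.strip() if candidate is not None else None
--         candidate = comment
--     return None
-- ===== Notes on version B (the rewrite author's own statement) =====
-- stated objective: simpler
-- what changed: Replaces A's two forward passes (enumerate to find the last marker index, then slice and scan for a non-marker) with a single reverse loop that carries the previously visited comment and returns it stripped at the first marker seen.
import Mathlib
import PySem

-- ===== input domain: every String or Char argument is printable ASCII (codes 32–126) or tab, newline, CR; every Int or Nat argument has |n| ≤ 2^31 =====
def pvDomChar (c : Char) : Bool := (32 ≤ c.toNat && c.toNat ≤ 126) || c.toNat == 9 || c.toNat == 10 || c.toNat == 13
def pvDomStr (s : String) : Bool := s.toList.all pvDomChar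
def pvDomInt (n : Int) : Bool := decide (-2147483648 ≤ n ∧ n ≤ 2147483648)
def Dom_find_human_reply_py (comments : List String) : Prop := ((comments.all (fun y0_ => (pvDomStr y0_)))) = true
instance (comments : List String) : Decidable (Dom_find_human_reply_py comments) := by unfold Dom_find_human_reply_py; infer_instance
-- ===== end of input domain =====

-- B replaces A's two forward passes (find last marker index, then slice and scan) by a
-- single reverse loop that keeps the previously visited comment; objective: simpler.

-- shared helper: '_SHAPE_TURN_MARKER in c or _SHAPE_OPTIONS_MARKER in c'
def pvMark (c : String) : Bool :=
  PySem.Str.isIn "**Shape Turn" c || PySem.Str.isIn "## Product Directions" c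

-- ===== PORT A =====
-- first loop: 'for i, comment in enumerate(comments): if marker: last_agent_idx = i'
def pvA_lastLoop (i : Int) (acc : Int) : List String → Int
  | [] => acc
  | c :: rest => pvA_lastLoop (i + 1) (if pvMark c then i else acc) rest

-- second loop: first non-marker comment of the slice, stripped
def pvA_findLoop : List String → Option String
  | [] => none
  | c :: rest => if !(pvMark c) then some (PySem.Str.strip c) else pvA_findLoop rest

def find_human_reply_py (comments : List String) : Option String :=
  let last_agent_idx := pvA_lastLoop 0 (-1) comments
  if last_agent_idx = -1 then none
  else pvA_findLoop (PySem.List.slice comments (some (last_agent_idx + 1)) none)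

-- ===== PORT B =====
-- 'for comment in reversed(comments): …' with candidate = previously visited comment
def pvB_go : List String → Option String → Option String
  | [], _ => none
  | c :: rest, cand =>
      if pvMark c then cand.map PySem.Str.strip else pvB_go rest (some c)

def find_human_reply_py_alt (comments : List String) : Option String :=
  pvB_go comments.reverse none

-- ===== PRECONDITION & SPEC =====
def Spec_find_human_reply_py (comments : List String) (out : Option String) : Prop := out = find_human_reply_py_alt comments
instance (comments : List String) (out : Option String) : Decidable (Spec_find_human_reply_py comments out) := by unfold Spec_find_human_reply_py; infer_instance

-- ===== CLAIM (what is proved, stated in full; the proofs are below) =====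
def Claim_equal_find_human_reply_py : Prop := ∀ (comments : List String), Dom_find_human_reply_py comments → Spec_find_human_reply_py comments (find_human_reply_py comments)

-- ===== LEMMAS AND PROOFS =====

theorem pvA_lastLoop_no_mark (l : List String) (i acc : Int)
    (h : ∀ c ∈ l, pvMark c = false) : pvA_lastLoop i acc l = acc := by
  induction l generalizing i acc with
  | nil => rfl
  | cons c rest ih =>
      simp only [pvA_lastLoop, h c (by simp), if_false, Bool.false_eq_true]
      exact ih _ _ (fun x hx => h x (by simp [hx]))

theorem pvA_lastLoop_split (a : List String) (m : String) (b : List String) (i acc : Int)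
    (hm : pvMark m = true) (hb : ∀ c ∈ b, pvMark c = false) :
    pvA_lastLoop i acc (a ++ m :: b) = i + a.length := by
  induction a generalizing i acc with
  | nil =>
      simp only [List.nil_append, pvA_lastLoop, hm, if_true]
      rw [pvA_lastLoop_no_mark b _ _ hb]; simp
  | cons c rest ih =>
      simp only [List.cons_append, pvA_lastLoop]
      rw [ih]
      simp; omega

theorem pvA_findLoop_no_mark (b : List String)
    (hb : ∀ c ∈ b, pvMark c = false) :
    pvA_findLoop b = b.head?.map PySem.Str.strip := by
  cases b with
  | nil => rfl
  | cons c rest => simp [pvA_findLoop, hb c (by simp)]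

theorem pvB_go_no_mark (l : List String) (cand : Option String)
    (h : ∀ c ∈ l, pvMark c = false) : pvB_go l cand = none := by
  induction l generalizing cand with
  | nil => rfl
  | cons c rest ih =>
      simp only [pvB_go, h c (by simp), if_false, Bool.false_eq_true]
      exact ih _ (fun x hx => h x (by simp [hx]))

theorem pvB_go_split (t : List String) (m : String) (r : List String) (cand : Option String)
    (ht : ∀ c ∈ t, pvMark c = false) (hm : pvMark m = true) :
    pvB_go (t ++ m :: r) cand = (t.getLast?.or cand).map PySem.Str.strip := by
  induction t generalizing cand with
  | nil => simp [pvB_go, hm]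
  | cons c rest ih =>
      simp only [List.cons_append, pvB_go, ht c (by simp), if_false, Bool.false_eq_true]
      rw [ih (some c) (fun x hx => ht x (by simp [hx]))]
      cases rest with
      | nil => simp
      | cons d rest' =>
          rw [List.getLast?_cons_cons]
          cases hga : (d :: rest').getLast? with
          | none => simp at hga
          | some a => rfl

theorem pvExists_split (l : List String) (h : ¬ ∀ c ∈ l, pvMark c = false) :
    ∃ t m rest, l = t ++ m :: rest ∧ (∀ c ∈ t, pvMark c = false) ∧ pvMark m = true := by
  induction l with
  | nil => exact absurd (by simp) h
  | cons c rest ih =>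
      by_cases hc : pvMark c = true
      · exact ⟨[], c, rest, by simp, by simp, hc⟩
      · have hc' : pvMark c = false := by simpa using hc
        have : ¬ ∀ x ∈ rest, pvMark x = false := by
          intro hall; apply h; intro x hx
          rcases List.mem_cons.mp hx with h1 | h2
          · rw [h1]; exact hc'
          · exact hall x h2
        obtain ⟨t, m, r, heq, ht, hm⟩ := ih this
        exact ⟨c :: t, m, r, by rw [heq]; rfl, by
          intro x hx
          rcases List.mem_cons.mp hx with h1 | h2
          · rw [h1]; exact hc'
          · exact ht x h2, hm⟩

-- ===== VERDICT (by name: the statement is the Claim_ definition above) =====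
theorem find_human_reply_py_spec : Claim_equal_find_human_reply_py := by
  intro comments _
  unfold Spec_find_human_reply_py find_human_reply_py find_human_reply_py_alt
  by_cases h : ∀ c ∈ comments, pvMark c = false
  · rw [pvA_lastLoop_no_mark comments 0 (-1) h]
    rw [pvB_go_no_mark comments.reverse none (fun c hc => h c (List.mem_reverse.mp hc))]
    simp
  · have hsplit := pvExists_split comments.reverse
      (by intro hall; exact h (fun c hc => hall c (List.mem_reverse.mpr hc)))
    obtain ⟨t, m, rest, hB, ht, hm⟩ := hsplit
    have hcomm : comments = rest.reverse ++ m :: t.reverse := by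
      have := congrArg List.reverse hB
      simpa using this
    -- A side
    have hA : pvA_lastLoop 0 (-1) comments = (rest.length : Int) := by
      rw [hcomm, pvA_lastLoop_split _ _ _ _ _ hm
        (fun c hc => ht c (List.mem_reverse.mp hc))]
      simp
    rw [hA]
    rw [if_neg (by omega : ((rest.length : Int)) ≠ -1)]
    rw [PySem.List.slice_from _ (by omega : (0:Int) ≤ (rest.length : Int) + 1)]
    rw [show ((rest.length : Int) + 1).toNat = rest.reverse.length + 1 by simp only [List.length_reverse]; omega]
    rw [hcomm]
    have hdrop : (rest.reverse ++ m :: t.reverse).drop (rest.reverse.length + 1) = t.reverse := by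
      rw [show rest.reverse.length + 1 = (rest.reverse ++ [m]).length by simp,
        show rest.reverse ++ m :: t.reverse = (rest.reverse ++ [m]) ++ t.reverse by simp,
        List.drop_left]
    rw [hdrop, pvA_findLoop_no_mark _ (fun c hc => ht c (List.mem_reverse.mp hc))]
    -- B side
    rw [show (rest.reverse ++ m :: t.reverse).reverse = t ++ m :: rest by simp]
    rw [pvB_go_split t m rest none ht hm]
    simp [List.head?_reverse]
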